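-- pv_equiv track=rewrite | github.com/bianca-8/Jack-Sprat---ICS3U1-Assignment | Jack Sprat.py | level3
-- ===== SOURCE A (Python) =====
-- def level3(number):
--     #add your level 3 code here
--     sum = 0
--
--     for i in range(1,number+1):
--       if number % i == 0:
--         sum += i
--
--     if sum == number + 1:
--       return "Lean"
--     elif sum >= 3 * number:
--       return "Fat"
--     else:
--       return "Neither"
-- ===== SOURCE B (Python) =====
-- def level3(number):
--     # Sum the divisors of `number` in divisor pairs (i, number // i), scanning
--     # only up to sqrt(number) instead of all the way to number.
--     total = 0
--     i = 1
--     while i * i <= number: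
--         if number % i == 0:
--             total += i
--             partner = number // i
--             if partner != i:
--                 total += partner
--         i += 1
--
--     if total == number + 1:
--         return "Lean"
--     elif total >= 3 * number:
--         return "Fat"
--     else:
--         return "Neither"
-- ===== Notes on version B (the rewrite author's own statement) =====
-- stated objective: faster
-- what changed: Replaces the O(n) scan of every candidate divisor 1..n with an O(sqrt(n)) loop that adds each divisor pair (i, n//i) while i*i <= n.
import Mathlib
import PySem

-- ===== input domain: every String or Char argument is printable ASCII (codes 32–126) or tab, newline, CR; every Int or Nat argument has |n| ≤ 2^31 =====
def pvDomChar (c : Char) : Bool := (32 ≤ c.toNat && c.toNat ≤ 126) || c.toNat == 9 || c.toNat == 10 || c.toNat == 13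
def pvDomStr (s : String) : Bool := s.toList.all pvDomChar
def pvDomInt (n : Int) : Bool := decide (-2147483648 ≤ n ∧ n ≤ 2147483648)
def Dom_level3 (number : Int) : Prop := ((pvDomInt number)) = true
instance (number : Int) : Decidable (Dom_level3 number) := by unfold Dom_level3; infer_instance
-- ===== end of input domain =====

-- B replaces A's O(n) scan of all candidate divisors with an O(√n) loop adding divisor pairs (i, n//i).

-- ===== PORT A =====
def level3 (number : Int) : String :=
  let sum :=
    (PySem.List.pyRange 1 (number + 1) 1).foldl
      (fun s i => if PySem.Int.mod number i = 0 then s + i else s) 0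
  if sum = number + 1 then "Lean"
  else if sum ≥ 3 * number then "Fat"
  else "Neither"

-- ===== PORT B =====
-- the 'while i * i <= number' loop of Source B
def level3AltLoop (number i total : Int) : Int :=
  if _h : i * i ≤ number then
    level3AltLoop number (i + 1)
      (if PySem.Int.mod number i = 0 then
        (let partner := PySem.Int.floordiv number i
         if partner ≠ i then total + i + partner else total + i)
       else total)
  else total
termination_by (number + 1 - i).toNat
decreasing_by
  have hi : i ≤ number := by nlinarith [sq_nonneg i, sq_nonneg (i - 1)]
  omega

def level3_alt (number : Int) : String :=
  let total := level3AltLoop number 1 0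
  if total = number + 1 then "Lean"
  else if total ≥ 3 * number then "Fat"
  else "Neither"

-- ===== PRECONDITION & SPEC =====
def Spec_level3 (number : Int) (out : String) : Prop := out = level3_alt number
instance (number : Int) (out : String) : Decidable (Spec_level3 number out) := by unfold Spec_level3; infer_instance

-- ===== CLAIM (what is proved, stated in full; the proofs are below) =====
def Claim_equal_level3 : Prop := ∀ (number : Int), Dom_level3 number → Spec_level3 number (level3 number)

-- ===== LEMMAS AND PROOFS =====

-- The pair term B adds for a candidate divisor d (in Nat).
def pairTerm (N d : Nat) : Nat :=
  if d ∣ N then (if d * d < N then d + N / d else d) else 0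

-- loop guard i*i ≤ N in terms of Nat.sqrt
theorem sq_le_iff (N : Nat) (i : Int) (hi : 1 ≤ i) :
    i * i ≤ (N : Int) ↔ i.toNat ≤ N.sqrt := by
  have hcast : ((i.toNat : Int)) = i := Int.toNat_of_nonneg (by omega)
  rw [Nat.le_sqrt]
  constructor
  · intro h
    have h2 : ((i.toNat * i.toNat : Nat) : Int) ≤ (N : Int) := by
      push_cast; rw [hcast]; exact h
    exact_mod_cast h2
  · intro h
    have h2 : ((i.toNat * i.toNat : Nat) : Int) ≤ (N : Int) := by exact_mod_cast h
    push_cast at h2; rw [hcast] at h2; exact h2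

-- for a divisor d of N ≥ 1: d² < N iff the cofactor's square exceeds N
theorem div_sq_lt (N d : Nat) (hN : 1 ≤ N) (hd : d ∣ N) :
    d * d < N ↔ N < (N / d) * (N / d) := by
  obtain ⟨e, rfl⟩ := hd
  have hd0 : 0 < d := by
    rcases Nat.eq_zero_or_pos d with h | h
    · subst h; simp at hN
    · exact h
  rw [Nat.mul_div_cancel_left e hd0]
  constructor <;> intro h <;> nlinarith

-- for a divisor d of N with d² ≤ N: the cofactor equals d iff d² = N
theorem cofactor_eq_iff (N d : Nat) (hd0 : 0 < d) (hd : d ∣ N) (hle : d * d ≤ N) :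
    N / d = d ↔ ¬ d * d < N := by
  obtain ⟨e, rfl⟩ := hd
  rw [Nat.mul_div_cancel_left e hd0]
  constructor
  · rintro rfl; simp
  · intro h
    exact (Nat.eq_of_mul_eq_mul_left hd0 (le_antisymm hle (not_lt.mp h))).symm

-- A's loop sum equals the divisor sum of N (number = ↑N, N ≥ 1)
theorem levelA_sum (N : Nat) (hN : 1 ≤ N) :
    (PySem.List.pyRange 1 ((N : Int) + 1) 1).foldl
      (fun s i => if PySem.Int.mod (N : Int) i = 0 then s + i else s) 0
    = ((∑ d ∈ N.divisors, d : Nat) : Int) := by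
  rw [PySem.List.foldl_congr_mem _ _
      (fun s i => s + (if PySem.Int.mod (N : Int) i = 0 then i else 0)) _
      (by intro acc x _; by_cases hc : PySem.Int.mod (N : Int) x = 0 <;> simp [hc])]
  rw [PySem.List.foldl_add, PySem.List.pyRange_one, List.map_map]
  have h1 : (((N : Int) + 1) - 1).toNat = N := by omega
  rw [h1, zero_add]
  have h2 : (((List.range N).map ((fun i => if PySem.Int.mod (N : Int) i = 0 then i else 0)
        ∘ fun k : Nat => (1 : Int) + (k : Int)))).sum
      = ∑ k ∈ Finset.range N, (if PySem.Int.mod (N : Int) (1 + (k : Int)) = 0 then (1 : Int) + k else 0) := rfl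
  rw [h2]
  have hdiv : (∑ d ∈ N.divisors, d) = ∑ k ∈ Finset.range N, (if (1 + k) ∣ N then 1 + k else 0) := by
    rw [show N.divisors = Finset.filter (· ∣ N) (Finset.Ico 1 (N + 1)) from rfl,
        Finset.sum_filter, Finset.sum_Ico_eq_sum_range]
    simp
  rw [hdiv]
  push_cast
  apply Finset.sum_congr rfl
  intro k _
  have hiff : PySem.Int.mod (N : Int) (1 + (k : Int)) = 0 ↔ (1 + k) ∣ N := by
    rw [PySem.Int.mod_eq_zero_iff_dvd]
    constructor
    · intro h; exact_mod_cast h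
    · intro h; exact_mod_cast h
  split_ifs with ha hb hb
  · rfl
  · exact absurd (hiff.mp ha) hb
  · exact absurd (hiff.mpr hb) ha
  · rfl

-- B's loop invariant: starting at i with 1 ≤ i, the loop adds the pair terms for d ∈ [i, √N]
theorem levelB_loop (N : Nat) (i t : Int) (hi : 1 ≤ i) :
    level3AltLoop (N : Int) i t
    = t + ((∑ d ∈ Finset.Ico i.toNat (N.sqrt + 1), pairTerm N d : Nat) : Int) := by
  generalize hm : N.sqrt + 1 - i.toNat = m
  induction m generalizing i t with
  | zero =>
    have hgt : ¬ (i * i ≤ (N : Int)) := fun h => by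
      have := (sq_le_iff N i hi).mp h; omega
    rw [level3AltLoop, dif_neg hgt, Finset.Ico_eq_empty (by omega)]
    simp
  | succ m ih =>
    by_cases h : i * i ≤ (N : Int)
    · have hle : i.toNat ≤ N.sqrt := (sq_le_iff N i hi).mp h
      have hd0 : 0 < i.toNat := by omega
      have hcast : ((i.toNat : Int)) = i := Int.toNat_of_nonneg (by omega)
      rw [level3AltLoop, dif_pos h]
      rw [ih (i + 1) _ (by omega) (by omega)]
      rw [Finset.sum_eq_sum_Ico_succ_bot (by omega : i.toNat < N.sqrt + 1)]
      have hsucc : (i + 1).toNat = i.toNat + 1 := by omega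
      rw [hsucc]
      have hmod := PySem.Int.mod_natCast N i.toNat
      rw [hcast] at hmod
      have hfd := PySem.Int.floordiv_natCast N i.toNat
      rw [hcast] at hfd
      have hsq : i.toNat * i.toNat ≤ N := Nat.le_sqrt.mp hle
      simp only [hmod, hfd]
      have hdvd_iff : ((N % i.toNat : Nat) : Int) = 0 ↔ i.toNat ∣ N := by
        rw [Nat.dvd_iff_mod_eq_zero]
        exact_mod_cast Iff.rfl
      by_cases hdvd : i.toNat ∣ N
      · rw [if_pos (hdvd_iff.mpr hdvd)]
        have key := cofactor_eq_iff N i.toNat hd0 hdvd hsq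
        unfold pairTerm
        rw [if_pos hdvd]
        by_cases hlt : i.toNat * i.toNat < N
        · have hne : ((N / i.toNat : Nat) : Int) ≠ i := by
            rw [← hcast]
            intro hh
            exact (key.mp (by exact_mod_cast hh)) hlt
          rw [if_pos hne, if_pos hlt]
          push_cast
          rw [hcast]
          ring
        · have heq : ((N / i.toNat : Nat) : Int) = i := by
            rw [← hcast]; exact_mod_cast key.mpr hlt
          rw [if_neg (by simpa using heq), if_neg hlt]
          push_cast
          rw [hcast]
          ring
      · rw [if_neg (fun hz => hdvd (hdvd_iff.mp hz))]
        have hpt : pairTerm N i.toNat = 0 := by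
          unfold pairTerm; rw [if_neg hdvd]
        rw [hpt]
        push_cast
        ring
    · have hgt : N.sqrt < i.toNat := by
        by_contra hc
        exact h ((sq_le_iff N i hi).mpr (by omega))
      rw [level3AltLoop, dif_neg h, Finset.Ico_eq_empty (by omega)]
      simp

-- the pairing argument: summing the pair terms for d ≤ √N gives the full divisor sum
theorem pair_sum (N : Nat) (hN : 1 ≤ N) :
    ∑ d ∈ Finset.Ico 1 (N.sqrt + 1), pairTerm N d = ∑ d ∈ N.divisors, d := by
  have hfe : (Finset.Ico 1 (N.sqrt + 1)).filter (· ∣ N)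
      = N.divisors.filter (fun d => d ≤ N.sqrt) := by
    ext d
    simp only [Finset.mem_filter, Finset.mem_Ico, Nat.mem_divisors, Nat.lt_succ_iff]
    constructor
    · rintro ⟨⟨h1, h2⟩, h3⟩; exact ⟨⟨h3, by omega⟩, h2⟩
    · rintro ⟨⟨h3, _⟩, h2⟩; exact ⟨⟨Nat.pos_of_dvd_of_pos h3 hN, h2⟩, h3⟩
  calc ∑ d ∈ Finset.Ico 1 (N.sqrt + 1), pairTerm N d
      = ∑ d ∈ (Finset.Ico 1 (N.sqrt + 1)).filter (· ∣ N), (if d * d < N then d + N / d else d) := by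
        rw [Finset.sum_filter]; rfl
    _ = ∑ d ∈ N.divisors.filter (fun d => d ≤ N.sqrt), (if d * d < N then d + N / d else d) := by
        rw [hfe]
    _ = ∑ d ∈ N.divisors.filter (fun d => d ≤ N.sqrt), d
        + ∑ d ∈ N.divisors.filter (fun d => d ≤ N.sqrt), (if d * d < N then N / d else 0) := by
        rw [← Finset.sum_add_distrib]
        apply Finset.sum_congr rfl
        intro d _
        split_ifs <;> omega
    _ = ∑ d ∈ N.divisors.filter (fun d => d ≤ N.sqrt), d
        + ∑ d ∈ N.divisors, (if d * d < N then N / d else 0) := by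
        congr 1
        rw [Finset.sum_filter]
        apply Finset.sum_congr rfl
        intro d _
        by_cases hle : d ≤ N.sqrt
        · rw [if_pos hle]
        · rw [if_neg hle, if_neg (by have := Nat.sqrt_lt.mp (by omega : N.sqrt < d); omega)]
    _ = ∑ d ∈ N.divisors.filter (fun d => d ≤ N.sqrt), d
        + ∑ d ∈ N.divisors, (if N < d * d then d else 0) := by
        congr 1
        rw [← Nat.sum_div_divisors N (fun e => if N < e * e then e else 0)]
        apply Finset.sum_congr rfl
        intro d hd
        have hdvd : d ∣ N := (Nat.mem_divisors.mp hd).1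
        have hiff := div_sq_lt N d hN hdvd
        split_ifs with h1 h2 h2
        · rfl
        · exact absurd (hiff.mp h1) h2
        · exact absurd (hiff.mpr h2) h1
        · rfl
    _ = ∑ d ∈ N.divisors.filter (fun d => d ≤ N.sqrt), d
        + ∑ d ∈ N.divisors.filter (fun d => ¬ d ≤ N.sqrt), d := by
        congr 1
        rw [Finset.sum_filter]
        apply Finset.sum_congr rfl
        intro d _
        have hiff : N < d * d ↔ ¬ d ≤ N.sqrt := by rw [← Nat.sqrt_lt]; omega
        exact if_congr hiff rfl rfl
    _ = ∑ d ∈ N.divisors, d := Finset.sum_filter_add_sum_filter_not _ _ _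

theorem sums_agree (number : Int) :
    (PySem.List.pyRange 1 (number + 1) 1).foldl
      (fun s i => if PySem.Int.mod number i = 0 then s + i else s) 0
    = level3AltLoop number 1 0 := by
  by_cases hn : 1 ≤ number
  · obtain ⟨N, rfl⟩ : ∃ N : Nat, number = (N : Int) :=
      ⟨number.toNat, (Int.toNat_of_nonneg (by omega)).symm⟩
    have hN : 1 ≤ N := by exact_mod_cast hn
    rw [levelA_sum N hN, levelB_loop N 1 0 le_rfl,
        show (1 : Int).toNat = 1 from rfl, pair_sum N hN]
    ring
  · rw [level3AltLoop, dif_neg (by simpa using hn), PySem.List.pyRange_one_eq_nil (by omega)]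
    rfl

-- ===== VERDICT (by name: the statement is the Claim_ definition above) =====
theorem level3_spec : Claim_equal_level3 := by
  intro number _
  unfold Spec_level3 level3 level3_alt
  rw [sums_agree]
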